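-- pv_equiv track=rewrite | github.com/chan042/abnormal-behavior-monitor | backend/app/demo/seed.py | _ping_pong_positions
-- ===== SOURCE A (Python) =====
-- from typing import Dict, List, Sequence, Tuple
--
-- def _ping_pong_positions(left: int, right: int, total_frames: int) -> List[int]:
--     positions: List[int] = []
--     direction = 1
--     current = left
--     step = max((right - left) // 14, 1)
--     for _ in range(total_frames):
--         positions.append(current)
--         current += step * direction
--         if current >= right:
--             current = right
--             direction = -1
--         elif current <= left:
--             current = left
--             direction = 1
--     return positions
-- ===== SOURCE B (Python) =====
-- from typing import List
--
-- def _ping_pong_positions(left: int, right: int, total_frames: int) -> List[int]: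
--     step = max((right - left) // 14, 1)
--
--     def advance(c, d):
--         c2 = c + step * d
--         if c2 >= right:
--             return right, -1
--         if c2 <= left:
--             return left, 1
--         return c2, d
--
--     # one full ping-pong cycle, starting from (left, heading up)
--     period = [left]
--     c, d = advance(left, 1)
--     while (c, d) != (left, 1):
--         period.append(c)
--         c, d = advance(c, d)
--     p = len(period)
--     return [period[i % p] for i in range(total_frames)]
-- ===== Notes on version B (the rewrite author's own statement) =====
-- stated objective: alternative
-- what changed: B builds one full oscillation period with a state-return loop and produces the output by modular indexing into that period, instead of A's frame-by-frame simulation of the bouncing cursor.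
import Mathlib
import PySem

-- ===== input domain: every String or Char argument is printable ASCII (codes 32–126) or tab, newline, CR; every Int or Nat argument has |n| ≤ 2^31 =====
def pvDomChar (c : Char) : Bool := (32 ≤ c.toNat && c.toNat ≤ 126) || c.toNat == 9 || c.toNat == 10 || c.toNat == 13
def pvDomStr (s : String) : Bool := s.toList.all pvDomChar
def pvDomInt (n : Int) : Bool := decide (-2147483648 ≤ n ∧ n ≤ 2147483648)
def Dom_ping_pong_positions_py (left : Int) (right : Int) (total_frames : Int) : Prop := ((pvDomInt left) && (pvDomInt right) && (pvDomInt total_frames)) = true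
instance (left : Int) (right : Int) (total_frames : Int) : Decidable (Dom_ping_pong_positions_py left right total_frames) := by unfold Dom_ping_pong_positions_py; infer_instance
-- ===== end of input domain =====

-- B replaces A's frame-by-frame simulation by building one full oscillation period and
-- indexing it modularly (objective: alternative decomposition; same asymptotic cost).

-- ===== PORT A =====
def ping_pong_positions_py (left : Int) (right : Int) (total_frames : Int) : List Int :=
  let step := max (PySem.Int.floordiv (right - left) 14) 1
  let res := (PySem.List.pyRange 0 total_frames 1).foldl
    (fun (st : List Int × Int × Int) _ =>
      let positions := st.1 ++ [st.2.2]
      let current := st.2.2 + step * st.2.1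
      if current ≥ right then (positions, -1, right)
      else if current ≤ left then (positions, 1, left)
      else (positions, st.2.1, current)) ([], 1, left)
  res.1

-- ===== PORT B =====
-- B's helper `advance(c, d)`
def pvAdvance (left : Int) (right : Int) (step : Int) (s : Int × Int) : Int × Int :=
  if s.1 + step * s.2 ≥ right then (right, -1)
  else if s.1 + step * s.2 ≤ left then (left, 1)
  else (s.1 + step * s.2, s.2)

-- B's `while` loop collecting one period; the fuel 64 is a totality bound only
-- (the loop provably terminates within it, see lemmas below).
def pvPeriodLoop (left : Int) (right : Int) (step : Int) : Nat → (Int × Int) → List Int → List Int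
  | 0, _, acc => acc
  | fuel+1, s, acc =>
      if s = (left, 1) then acc
      else pvPeriodLoop left right step fuel (pvAdvance left right step s) (acc ++ [s.1])

def ping_pong_positions_py_alt (left : Int) (right : Int) (total_frames : Int) : List Int :=
  let step := max (PySem.Int.floordiv (right - left) 14) 1
  let period := pvPeriodLoop left right step 64 (pvAdvance left right step (left, 1)) [left]
  let p : Int := (period.length : Int)
  (PySem.List.pyRange 0 total_frames 1).map
    (fun i => PySem.List.pyGetD period (PySem.Int.mod i p) 0)

-- ===== PRECONDITION & SPEC =====
def Spec_ping_pong_positions_py (left : Int) (right : Int) (total_frames : Int) (out : List Int) : Prop := out = ping_pong_positions_py_alt left right total_frames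
instance (left : Int) (right : Int) (total_frames : Int) (out : List Int) : Decidable (Spec_ping_pong_positions_py left right total_frames out) := by unfold Spec_ping_pong_positions_py; infer_instance

-- ===== CLAIM (what is proved, stated in full; the proofs are below) =====
def Claim_equal_ping_pong_positions_py : Prop := ∀ (left : Int) (right : Int) (total_frames : Int), Dom_ping_pong_positions_py left right total_frames → Spec_ping_pong_positions_py left right total_frames (ping_pong_positions_py left right total_frames)

-- ===== LEMMAS AND PROOFS =====

-- the state trajectory of the oscillation, shared yardstick for both ports
def pvIter (left : Int) (right : Int) (step : Int) (n : Nat) : Int × Int :=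
  (pvAdvance left right step)^[n] (left, 1)

lemma pv_ascent (left right step : Int) (K : Nat)
    (h1 : 1 ≤ step)
    (hmin : ∀ j : Nat, 0 < j → j < K → (j : Int) * step < right - left) :
    ∀ j : Nat, j < K → pvIter left right step j = (left + j * step, 1) := by
  intro j
  induction j with
  | zero => intro _; simp [pvIter]
  | succ j ih =>
      intro hj
      have hjK : j < K := Nat.lt_of_succ_lt hj
      have hjpos : (0:Int) ≤ (j:Int) := Int.natCast_nonneg j
      have hlt : ((j:Int) + 1) * step < right - left := by
        have := hmin (j+1) (Nat.succ_pos j) hj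
        push_cast at this; linarith
      have hge1 : (1:Int) ≤ ((j:Int) + 1) * step := by nlinarith
      rw [pvIter, Function.iterate_succ_apply', ← pvIter, ih hjK]
      simp only [pvAdvance]
      rw [if_neg (by nlinarith), if_neg (by nlinarith)]
      simp only [Prod.mk.injEq, and_true]
      push_cast; ring

lemma pv_top (left right step : Int) (K : Nat)
    (h1 : 1 ≤ step) (hK1 : 1 ≤ K)
    (hKs : right - left ≤ (K : Int) * step)
    (hmin : ∀ j : Nat, 0 < j → j < K → (j : Int) * step < right - left) :
    pvIter left right step K = (right, -1) := by
  obtain ⟨j, rfl⟩ : ∃ j, K = j + 1 := ⟨K - 1, (Nat.succ_pred_eq_of_pos hK1).symm⟩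
  rw [pvIter, Function.iterate_succ_apply', ← pvIter,
    pv_ascent left right step (j+1) h1 hmin j (Nat.lt_succ_self j)]
  simp only [pvAdvance]
  rw [if_pos (by push_cast at hKs ⊢; nlinarith)]

lemma pv_descent (left right step : Int) (K : Nat)
    (h1 : 1 ≤ step) (hK1 : 1 ≤ K)
    (hKs : right - left ≤ (K : Int) * step)
    (hmin : ∀ j : Nat, 0 < j → j < K → (j : Int) * step < right - left) :
    ∀ j : Nat, j < K → pvIter left right step (K + j) = (right - j * step, -1) := by
  intro j
  induction j with
  | zero => intro _; simpa using pv_top left right step K h1 hK1 hKs hmin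
  | succ j ih =>
      intro hj
      have hjK : j < K := Nat.lt_of_succ_lt hj
      have hjpos : (0:Int) ≤ (j:Int) := Int.natCast_nonneg j
      have hlt : ((j:Int) + 1) * step < right - left := by
        have := hmin (j+1) (Nat.succ_pos j) hj
        push_cast at this; linarith
      have hge1 : (1:Int) ≤ ((j:Int) + 1) * step := by nlinarith
      have : K + (j+1) = (K + j) + 1 := rfl
      rw [this, pvIter, Function.iterate_succ_apply', ← pvIter, ih hjK]
      simp only [pvAdvance]
      rw [if_neg (by nlinarith), if_neg (by nlinarith)]
      simp only [Prod.mk.injEq, and_true]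
      push_cast; ring

lemma pv_return (left right step : Int) (K : Nat)
    (h1 : 1 ≤ step) (hK1 : 1 ≤ K)
    (hKs : right - left ≤ (K : Int) * step)
    (hmin : ∀ j : Nat, 0 < j → j < K → (j : Int) * step < right - left) :
    pvIter left right step (2 * K) = (left, 1) := by
  obtain ⟨j, rfl⟩ : ∃ j, K = j + 1 := ⟨K - 1, (Nat.succ_pred_eq_of_pos hK1).symm⟩
  have h2 : 2 * (j+1) = ((j+1) + j) + 1 := by ring
  have hjpos : (0:Int) ≤ (j:Int) := Int.natCast_nonneg j
  rw [h2, pvIter, Function.iterate_succ_apply', ← pvIter,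
    pv_descent left right step (j+1) h1 hK1 hKs hmin j (Nat.lt_succ_self j)]
  simp only [pvAdvance]
  push_cast at hKs
  rw [if_neg (by nlinarith), if_pos (by nlinarith)]

lemma pv_ne (left right step : Int) (K : Nat)
    (h1 : 1 ≤ step) (hK1 : 1 ≤ K)
    (hKs : right - left ≤ (K : Int) * step)
    (hmin : ∀ j : Nat, 0 < j → j < K → (j : Int) * step < right - left) :
    ∀ i : Nat, 0 < i → i < 2 * K → pvIter left right step i ≠ (left, 1) := by
  intro i hi0 hi2
  rcases lt_or_ge i K with hiK | hiK
  · rw [pv_ascent left right step K h1 hmin i hiK]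
    have hipos : (1:Int) ≤ (i:Int) := by exact_mod_cast hi0
    have : left < left + (i:Int) * step := by nlinarith
    intro h
    simp only [Prod.mk.injEq] at h
    linarith [h.1]
  · obtain ⟨j, rfl⟩ : ∃ j, i = K + j := ⟨i - K, (Nat.add_sub_cancel' hiK).symm⟩
    have hjK : j < K := by omega
    rw [pv_descent left right step K h1 hK1 hKs hmin j hjK]
    intro h
    simp only [Prod.mk.injEq] at h
    omega

lemma pv_loop_spec (left right step : Int) :
    ∀ (m fuel : Nat) (s : Int × Int) (acc : List Int), m ≤ fuel →
      (pvAdvance left right step)^[m] s = (left, 1) →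
      (∀ i : Nat, i < m → (pvAdvance left right step)^[i] s ≠ (left, 1)) →
      pvPeriodLoop left right step fuel s acc
        = acc ++ (List.range m).map (fun i => ((pvAdvance left right step)^[i] s).1) := by
  intro m
  induction m with
  | zero =>
      intro fuel s acc _ h0 _
      simp only [Function.iterate_zero, id_eq] at h0
      subst h0
      cases fuel <;> simp [pvPeriodLoop]
  | succ m ih =>
      intro fuel s acc hle hret hne
      obtain ⟨fu, rfl⟩ : ∃ fu, fuel = fu + 1 := ⟨fuel - 1, by omega⟩
      have hs : s ≠ (left, 1) := by
        have := hne 0 (Nat.succ_pos m); simpa using this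
      rw [pvPeriodLoop, if_neg hs]
      rw [ih fu (pvAdvance left right step s) (acc ++ [s.1]) (by omega)
        (by rw [← Function.iterate_succ_apply]; exact hret)
        (by intro i hi; rw [← Function.iterate_succ_apply]; exact hne (i+1) (by omega))]
      simp [List.range_succ_eq_map, List.map_map, Function.iterate_succ_apply, Function.comp]

lemma pv_foldlA (left right step : Int) :
    ∀ (l : List Int) (st : List Int × Int × Int),
      (l.foldl
        (fun (st : List Int × Int × Int) _ =>
          let positions := st.1 ++ [st.2.2]
          let current := st.2.2 + step * st.2.1
          if current ≥ right then (positions, -1, right)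
          else if current ≤ left then (positions, 1, left)
          else (positions, st.2.1, current)) st).1
      = st.1 ++ (List.range l.length).map
          (fun i => ((pvAdvance left right step)^[i] (st.2.2, st.2.1)).1) := by
  intro l
  induction l with
  | nil => intro st; simp
  | cons x t ih =>
      intro st
      rw [List.foldl_cons, ih]
      by_cases h1 : right ≤ st.2.2 + step * st.2.1
      · have hf : pvAdvance left right step (st.2.2, st.2.1) = (right, -1) := by
          simp [pvAdvance, h1]
        simp [h1, List.range_succ_eq_map, List.map_map, Function.iterate_succ_apply,
          Function.comp, hf]
      · by_cases h2 : st.2.2 + step * st.2.1 ≤ left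
        · have hf : pvAdvance left right step (st.2.2, st.2.1) = (left, 1) := by
            simp [pvAdvance, h1, h2]
          simp [h1, h2, List.range_succ_eq_map, List.map_map, Function.iterate_succ_apply,
            Function.comp, hf]
        · have hf : pvAdvance left right step (st.2.2, st.2.1) = (st.2.2 + step * st.2.1, st.2.1) := by
            simp [pvAdvance, h1, h2]
          simp [h1, h2, List.range_succ_eq_map, List.map_map, Function.iterate_succ_apply,
            Function.comp, hf]

lemma pv_iter_mod (left right step : Int) (P : Nat)
    (hret : pvIter left right step P = (left, 1)) :
    ∀ k : Nat, pvIter left right step k = pvIter left right step (k % P) := by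
  have key : ∀ q r : Nat, pvIter left right step (q * P + r) = pvIter left right step r := by
    intro q
    induction q with
    | zero => intro r; simp
    | succ q ih =>
        intro r
        have h : (q + 1) * P + r = (q * P + r) + P := by ring
        rw [h, pvIter, Function.iterate_add_apply]
        have : (pvAdvance left right step)^[P] (left, 1) = (left, 1) := hret
        rw [this, ← pvIter, ih r]
  intro k
  conv_lhs => rw [show k = k / P * P + k % P from (Nat.div_add_mod' k P).symm]
  exact key (k / P) (k % P)

lemma pv_main (left right total_frames step : Int)
    (h1 : 1 ≤ step) (h27 : right - left ≤ 27 * step) :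
    ((PySem.List.pyRange 0 total_frames 1).foldl
      (fun (st : List Int × Int × Int) _ =>
        let positions := st.1 ++ [st.2.2]
        let current := st.2.2 + step * st.2.1
        if current ≥ right then (positions, -1, right)
        else if current ≤ left then (positions, 1, left)
        else (positions, st.2.1, current)) ([], 1, left)).1
    = (PySem.List.pyRange 0 total_frames 1).map
        (fun i => PySem.List.pyGetD
          (pvPeriodLoop left right step 64 (pvAdvance left right step (left, 1)) [left])
          (PySem.Int.mod i
            ((pvPeriodLoop left right step 64 (pvAdvance left right step (left, 1)) [left]).length : Int)) 0) := by
  have hex : ∃ k : Nat, right - left ≤ ((k : Int) + 1) * step := ⟨26, by push_cast; linarith⟩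
  set K := Nat.find hex + 1 with hKdef
  have hK1 : 1 ≤ K := by omega
  have hKle : K ≤ 27 := by
    have := Nat.find_le (n := 26) (h := hex)
      (by push_cast; linarith)
    omega
  have hKs : right - left ≤ (K : Int) * step := by
    have := Nat.find_spec hex
    have hc : ((K : Nat) : Int) = (Nat.find hex : Int) + 1 := by rw [hKdef]; push_cast; ring
    rw [hc]; linarith
  have hmin : ∀ j : Nat, 0 < j → j < K → (j : Int) * step < right - left := by
    intro j hj0 hjK
    have h := Nat.find_min hex (m := j - 1) (by omega)
    have hj1 : ((j - 1 : Nat) : Int) = (j : Int) - 1 := by omega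
    rw [hj1] at h
    linarith
  have hret : pvIter left right step (2 * K) = (left, 1) :=
    pv_return left right step K h1 hK1 hKs hmin
  have hne := pv_ne left right step K h1 hK1 hKs hmin
  have hloop := pv_loop_spec left right step (2 * K - 1) 64
    (pvAdvance left right step (left, 1)) [left] (by omega)
    (by
      rw [← Function.iterate_succ_apply]
      have h2 : (2 * K - 1).succ = 2 * K := by omega
      rw [h2]; exact hret)
    (by
      intro i hi
      rw [← Function.iterate_succ_apply]
      exact hne (i + 1) (by omega) (by omega))
  have hperiod : pvPeriodLoop left right step 64 (pvAdvance left right step (left, 1)) [left]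
      = (List.range (2 * K)).map (fun i => (pvIter left right step i).1) := by
    rw [hloop]
    have h2K : 2 * K = (2 * K - 1) + 1 := by omega
    rw [h2K, List.range_succ_eq_map]
    simp [List.map_map, Function.comp, Function.iterate_succ_apply, pvIter]
  have hlen : (pvPeriodLoop left right step 64 (pvAdvance left right step (left, 1)) [left]).length
      = 2 * K := by rw [hperiod]; simp
  rw [pv_foldlA left right step (PySem.List.pyRange 0 total_frames 1) ([], 1, left)]
  rw [PySem.List.length_pyRange_one, PySem.List.pyRange_one]
  simp only [List.nil_append, List.map_map]
  apply List.map_congr_left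
  intro k hk
  have hk' : k < (total_frames - 0).toNat := List.mem_range.mp hk
  simp only [Function.comp]
  have hz : (0 : Int) + (k : Int) = ((k : Nat) : Int) := by ring
  rw [hz, hlen, hperiod]
  rw [PySem.Int.mod_natCast, PySem.List.pyGetD_natCast,
    PySem.List.getD_map_range _ _ _ _ (Nat.mod_lt k (by omega))]
  exact congrArg Prod.fst (pv_iter_mod left right step (2 * K) hret k)

-- ===== VERDICT (by name: the statement is the Claim_ definition above) =====
theorem ping_pong_positions_py_spec : Claim_equal_ping_pong_positions_py := by
  intro left right total_frames _
  unfold Spec_ping_pong_positions_py ping_pong_positions_py ping_pong_positions_py_alt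
  have h1 : (1 : Int) ≤ max (PySem.Int.floordiv (right - left) 14) 1 := le_max_right _ _
  have h27 : right - left ≤ 27 * max (PySem.Int.floordiv (right - left) 14) 1 := by
    rcases le_or_gt (right - left) 27 with h | h
    · nlinarith [le_max_right (PySem.Int.floordiv (right - left) 14) (1 : Int)]
    · have hq : PySem.Int.floordiv (right - left) 14 = (right - left) / 14 :=
        PySem.Int.floordiv_eq_ediv_of_pos (by norm_num)
      have hmax : max (PySem.Int.floordiv (right - left) 14) 1
          = (right - left) / 14 := by
        rw [hq]; exact max_eq_left (by omega)
      rw [hmax]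
      omega
  exact pv_main left right total_frames _ h1 h27
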